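-- pv_equiv track=rewrite | github.com/ydhamija96/random-projects | Old Dump/Bot/redditcommentsbot/redditcommentsbot.py | textFits
-- ===== SOURCE A (Python) =====
-- def textFits(text):
-- 	"""This function will return True if the text either begins
-- 	with "You can't " or contains ". You can't " (or any variations). Otherwise it
-- 	will return False."""
-- 	text = text.lower()
-- 	pronouns = ["you", "i", "we", "he", "she", "they"]
-- 	triggers = ["can't", "cannot", "couldn't", "can not", "could not"]
-- 	if len(text) < 100:
-- 		for trigger in triggers:
-- 			if ("s "+trigger in text):
-- 				return True
-- 		for pronoun in pronouns:
-- 			for trigger in triggers: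
-- 				if ((". "+pronoun+" "+trigger) in text):
-- 					return True
-- 				length = len(pronoun)+len(trigger)+1
-- 				if len(text)>=length:
-- 					if((""+pronoun+" "+trigger) == text[:length]):
-- 						return True
-- 	return False
-- ===== SOURCE B (Python) =====
-- def textFits(text):
--     """Single left-to-right scan: at each position where a trigger starts,
--     classify the preceding context (ends with "s ", is exactly "<pronoun> ",
--     or ends with ". <pronoun> ")."""
--     text = text.lower()
--     if len(text) >= 100:
--         return False
--     pronouns = ("you", "i", "we", "he", "she", "they")
--     triggers = ("can't", "cannot", "couldn't", "can not", "could not")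
--     for i in range(len(text)):
--         if any(text.startswith(tr, i) for tr in triggers):
--             pre = text[:i]
--             if pre.endswith("s ") or any(pre == p + " " or pre.endswith(". " + p + " ") for p in pronouns):
--                 return True
--     return False
-- ===== Notes on version B (the rewrite author's own statement) =====
-- stated objective: alternative
-- what changed: A tests 35 separate pattern strings for membership/prefix (5 's '-patterns, then 6x5 pronoun-trigger pairs, each with an infix test and a slice comparison); B makes one left-to-right scan over the text and, at each position where some trigger starts, classifies the preceding context (ends with 's ', equals '<pronoun> ', or ends with '. <pronoun> ').
import Mathlib
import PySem

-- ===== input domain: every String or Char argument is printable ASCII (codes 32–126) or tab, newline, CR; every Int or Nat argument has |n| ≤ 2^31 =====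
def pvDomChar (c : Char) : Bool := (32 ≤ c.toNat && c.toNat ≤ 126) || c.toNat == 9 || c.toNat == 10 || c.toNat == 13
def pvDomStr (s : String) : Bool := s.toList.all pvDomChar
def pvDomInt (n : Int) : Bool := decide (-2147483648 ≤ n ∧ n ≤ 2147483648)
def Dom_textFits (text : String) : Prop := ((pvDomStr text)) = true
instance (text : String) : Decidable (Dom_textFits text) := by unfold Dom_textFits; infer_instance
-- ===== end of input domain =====

-- B replaces A's 35 separate substring-membership tests by ONE left-to-right scan that
-- classifies the context in front of each trigger occurrence (objective: alternative).

-- ===== PORT A =====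
def pvPronounsA : List (List Char) :=
  ["you".toList, "i".toList, "we".toList, "he".toList, "she".toList, "they".toList]
def pvTriggersA : List (List Char) :=
  ["can't".toList, "cannot".toList, "couldn't".toList, "can not".toList, "could not".toList]

def textFits (text : String) : Bool :=
  let t := PySem.Chars.lower text.toList
  if t.length < 100 then
    (pvTriggersA.any (fun tr => PySem.Chars.isIn ("s ".toList ++ tr) t)) ||
    (pvPronounsA.any (fun p => pvTriggersA.any (fun tr =>
      PySem.Chars.isIn (". ".toList ++ p ++ " ".toList ++ tr) t ||
      (let length := p.length + tr.length + 1
       if length ≤ t.length then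
         decide (PySem.Chars.slice t none (some (length : Int)) = p ++ " ".toList ++ tr)
       else false))))
  else false

-- ===== PORT B =====
def pvPronounsB : List (List Char) :=
  ["you".toList, "i".toList, "we".toList, "he".toList, "she".toList, "they".toList]
def pvTriggersB : List (List Char) :=
  ["can't".toList, "cannot".toList, "couldn't".toList, "can not".toList, "could not".toList]

-- pre.endswith("s ") or any(pre == p+" " or pre.endswith(". "+p+" ") for p in pronouns)
def pvContext (pre : List Char) : Bool :=
  PySem.Chars.endswith pre "s ".toList ||
  pvPronounsB.any (fun p =>
    pre == p ++ " ".toList || PySem.Chars.endswith pre (". ".toList ++ p ++ " ".toList))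

-- the loop 'for i in range(len(text))', with pre = text[:i] and rest = text[i:]
def pvScan (pre rest : List Char) : Bool :=
  match rest with
  | [] => false
  | c :: rs =>
    if (pvTriggersB.any (fun tr => PySem.Chars.startswith rest tr)) && pvContext pre then
      true
    else
      pvScan (pre ++ [c]) rs

def textFits_alt (text : String) : Bool :=
  let t := PySem.Chars.lower text.toList
  if 100 ≤ t.length then false
  else pvScan [] t

-- ===== PRECONDITION & SPEC =====
def Spec_textFits (text : String) (out : Bool) : Prop := out = textFits_alt text
instance (text : String) (out : Bool) : Decidable (Spec_textFits text out) := by unfold Spec_textFits; infer_instance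

-- ===== CLAIM (what is proved, stated in full; the proofs are below) =====
def Claim_equal_textFits : Prop := ∀ (text : String), Dom_textFits text → Spec_textFits text (textFits text)

-- ===== LEMMAS AND PROOFS =====

-- B's context condition, as a proposition
def pvCtxProp (pre : List Char) : Prop :=
  "s ".toList <:+ pre ∨
  ∃ p ∈ pvPronounsB, pre = p ++ " ".toList ∨ (". ".toList ++ p ++ " ".toList) <:+ pre

lemma pvContext_iff (pre : List Char) : pvContext pre = true ↔ pvCtxProp pre := by
  simp [pvContext, pvCtxProp, List.any_eq_true, PySem.Chars.endswith_iff]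

lemma pvHit_iff (rest : List Char) :
    (pvTriggersB.any (fun tr => PySem.Chars.startswith rest tr)) = true ↔
      ∃ tr ∈ pvTriggersB, tr <+: rest := by
  simp [List.any_eq_true, PySem.Chars.startswith_iff]

-- B's scan finds a trigger occurrence with an accepted context
lemma pvScan_iff (rest pre : List Char) :
    pvScan pre rest = true ↔
      ∃ i, (∃ tr ∈ pvTriggersB, tr <+: rest.drop i) ∧ pvCtxProp (pre ++ rest.take i) := by
  induction rest generalizing pre with
  | nil =>
    simp only [pvScan]
    refine iff_of_false (by simp) ?_
    rintro ⟨i, ⟨tr, htr, hpre⟩, -⟩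
    rw [List.drop_nil] at hpre
    have h0 := List.prefix_nil.mp hpre
    subst h0
    revert htr; decide
  | cons c rs ih =>
    simp only [pvScan]
    by_cases h : ((pvTriggersB.any fun tr => PySem.Chars.startswith (c :: rs) tr) && pvContext pre) = true
    · rw [if_pos h]
      rw [Bool.and_eq_true] at h
      obtain ⟨h1, h2⟩ := h
      exact iff_of_true rfl ⟨0, (pvHit_iff _).mp h1, by simpa using (pvContext_iff pre).mp h2⟩
    · rw [if_neg h, ih]
      constructor
      · rintro ⟨i, h1, h2⟩
        refine ⟨i + 1, ?_, ?_⟩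
        · simpa using h1
        · have hEq : (pre ++ [c]) ++ rs.take i = pre ++ (c :: rs).take (i + 1) := by simp
          rw [← hEq]; exact h2
      · rintro ⟨i, h1, h2⟩
        match i with
        | 0 =>
          exfalso
          apply h
          rw [Bool.and_eq_true]
          refine ⟨(pvHit_iff _).mpr ?_, (pvContext_iff pre).mpr ?_⟩
          · simpa using h1
          · simpa using h2
        | (j+1) =>
          refine ⟨j, by simpa using h1, ?_⟩
          have hEq : (pre ++ [c]) ++ rs.take j = pre ++ (c :: rs).take (j + 1) := by simp
          rw [hEq]; exact h2

-- an occurrence of ctx ++ v anywhere is an occurrence of v with ctx ending right before it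
lemma pvInfix_split (ctx v t : List Char) :
    (∃ j, (ctx ++ v) <+: t.drop j) ↔ ∃ i, v <+: t.drop i ∧ ctx <:+ t.take i := by
  constructor
  · rintro ⟨j, r, hr⟩
    have hT : t = (t.take j ++ ctx) ++ (v ++ r) := by
      conv_lhs => rw [← List.take_append_drop j t]
      rw [← hr]
      simp [List.append_assoc]
    set u := t.take j ++ ctx with hu
    refine ⟨u.length, ?_, ?_⟩
    · rw [hT, List.drop_left]
      exact ⟨r, rfl⟩
    · rw [hT, List.take_left]
      exact ⟨t.take j, rfl⟩
  · rintro ⟨i, ⟨r, hr⟩, ⟨xs, hxs⟩⟩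
    have hT : t = xs ++ (ctx ++ (v ++ r)) := by
      conv_lhs => rw [← List.take_append_drop i t]
      rw [← hxs, ← hr]
      simp [List.append_assoc]
    refine ⟨xs.length, ?_⟩
    rw [hT, List.drop_left]
    exact ⟨r, by simp⟩

lemma pvIsIn_split (ctx v t : List Char) :
    PySem.Chars.isIn (ctx ++ v) t = true ↔ ∃ i, v <+: t.drop i ∧ ctx <:+ t.take i := by
  rw [← PySem.Chars.exists_prefix_drop_iff_isIn, pvInfix_split]

lemma pvPrefix_split (u v t : List Char) :
    (u ++ v) <+: t ↔ ∃ i, v <+: t.drop i ∧ t.take i = u := by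
  constructor
  · rintro ⟨r, hr⟩
    refine ⟨u.length, ?_, ?_⟩
    · rw [← hr, List.append_assoc, List.drop_left]
      exact ⟨r, rfl⟩
    · rw [← hr, List.append_assoc, List.take_left]
  · rintro ⟨i, ⟨r, hr⟩, hu⟩
    refine ⟨r, ?_⟩
    calc (u ++ v) ++ r = u ++ (v ++ r) := by rw [List.append_assoc]
    _ = t.take i ++ t.drop i := by rw [hu, hr]
    _ = t := List.take_append_drop i t

-- A's exact-prefix branch tests 'text starts with pronoun ++ " " ++ trigger'
lemma pvGuard_iff (p tr t : List Char) :
    (if p.length + tr.length + 1 ≤ t.length then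
        decide (PySem.Chars.slice t none (some ((p.length + tr.length + 1 : Nat) : Int)) = p ++ " ".toList ++ tr)
      else false) = true ↔ (p ++ " ".toList ++ tr) <+: t := by
  have hlen : (p ++ " ".toList ++ tr).length = p.length + tr.length + 1 := by
    simp [List.length_append]
    omega
  split_ifs with hle
  · rw [PySem.Chars.slice_eq_listSlice, PySem.List.slice_to_natCast]
    simp only [decide_eq_true_eq]
    rw [List.prefix_iff_eq_take, hlen]
    exact eq_comm
  · simp only [false_iff]
    intro hp
    exact hle (hlen ▸ hp.length_le)

-- ===== VERDICT (by name: the statement is the Claim_ definition above) =====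
theorem textFits_spec : Claim_equal_textFits := by
  intro text _
  show textFits text = textFits_alt text
  simp only [textFits, textFits_alt]
  set t := PySem.Chars.lower text.toList with ht
  by_cases h : t.length < 100
  · rw [if_pos h, if_neg (show ¬ 100 ≤ t.length by omega)]
    rw [Bool.eq_iff_iff, pvScan_iff]
    simp only [List.nil_append, Bool.or_eq_true, List.any_eq_true]
    constructor
    · rintro (⟨tr, htr, hin⟩ | ⟨p, hp, tr, htr, hin | hin⟩)
      · obtain ⟨i, h1, h2⟩ := (pvIsIn_split "s ".toList tr t).mp hin
        exact ⟨i, ⟨tr, htr, h1⟩, Or.inl h2⟩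
      · obtain ⟨i, h1, h2⟩ := (pvIsIn_split (". ".toList ++ p ++ " ".toList) tr t).mp hin
        exact ⟨i, ⟨tr, htr, h1⟩, Or.inr ⟨p, hp, Or.inr h2⟩⟩
      · obtain ⟨i, h1, h2⟩ := (pvPrefix_split (p ++ " ".toList) tr t).mp ((pvGuard_iff p tr t).mp hin)
        exact ⟨i, ⟨tr, htr, h1⟩, Or.inr ⟨p, hp, Or.inl h2⟩⟩
    · rintro ⟨i, ⟨tr, htr, h1⟩, h2 | ⟨p, hp, h2 | h2⟩⟩
      · exact Or.inl ⟨tr, htr, (pvIsIn_split "s ".toList tr t).mpr ⟨i, h1, h2⟩⟩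
      · exact Or.inr ⟨p, hp, tr, htr, Or.inr ((pvGuard_iff p tr t).mpr
          ((pvPrefix_split (p ++ " ".toList) tr t).mpr ⟨i, h1, h2⟩))⟩
      · exact Or.inr ⟨p, hp, tr, htr, Or.inl ((pvIsIn_split (". ".toList ++ p ++ " ".toList) tr t).mpr ⟨i, h1, h2⟩)⟩
  · rw [if_neg h, if_pos (show 100 ≤ t.length by omega)]
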